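/- GENERATED by tools/from_farm_form.py from farm/worked/fill_buffer/Proof.lean (a worked proof of the farm's unit `fill_buffer`,
   accepted by the verdict) — do not edit. -/
import Toy.Spec.Units.fill_buffer
open X86 X86.User Asan ProgX.Base

set_option maxRecDepth 4000
set_option maxHeartbeats 4000000

/-- `fill_buffer` satisfies its contract: two pushes and `sub rsp, 8`; `memcpy(buffer, in, n)` by its contract (the first `n` of the
64 live bytes of the buffer); `memset(buffer + n, fill_byte, 64 - n)` by its contract (the rest of the buffer), with the byte read from
the global `fill_byte` at 0x141800 without a check (only `Lay.Has`); the pops and the `ret`. After each call the three stack slots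
still needed (saved rbp, rbx, the return address) are carried through the callee's footprint. -/
theorem Toy.Spec.Proved.fill_buffer_ok : Toy.Spec.fill_buffer.Statement := by
  intro Lay hLay μ hμ u₀ hcode h_memcpy h_memset others frames u ret he hpre
  v_entry he
  obtain ⟨hsh, hn, hlbuf, hsrc⟩ := hpre
  have hsp := hsh.rsp
  have hcpy := h_memcpy others frames
  have hset := h_memset others frames
  -- where the buffer is: one arithmetic fact
  have hwhere : 0x140000 ≤ (u.reg .rdi).toNat ∧ (u.reg .rdi).toNat + 64 ≤ 0xC00000 ∧
        ((u.reg .rsp).toNat + 8 ≤ (u.reg .rdi).toNat ∨ (u.reg .rdi).toNat + 64 ≤ 0x700000 ∨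
          0x800000 ≤ (u.reg .rdi).toNat) :=
    hlbuf.where_ hsh.inv hsh.offText (by omega)
  u_walk hcode [hμ.vendor] span [ProgX.Base.L.textLo, ProgX.Base.L.textHi] side (v_side)
  · -- call_inv (0x10540c): DF and the MXCSR masks at the entry of `memcpy`
    v_inv
  · -- pre_10540c, toy.c:39: the precondition of `memcpy(buffer, in, n)`: the arguments are still in rdi, rsi, rdx
    have c_rdi : s_10540c.reg .rdi = u.reg .rdi := w_kept.get .rdi rfl
    have c_rsi : s_10540c.reg .rsi = u.reg .rsi := w_kept.get .rsi rfl
    have c_rdx : s_10540c.reg .rdx = u.reg .rdx := w_kept.get .rdx rfl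
    have hun : ShadowUntouched u.mem s_10540c.mem := by v_untouched
    refine ⟨hsh.callee hun ?_ ?_ ?_, ?_⟩
    · rw [w_rsp]
      u_omega
    · rw [w_rsp]
      u_omega
    · rw [w_rsp]
      u_omega
    · rw [c_rdi, c_rsi, c_rdx]
      rcases hsrc with h0 | ⟨hlsrc, hov⟩
      · exact Or.inl h0
      · exact Or.inr ⟨hlsrc, hlbuf.sub _ _ (Nat.le_refl _) (by omega), hov⟩
  · -- 0x105411: after the return of `memcpy`
    have c_rdi : s_10540c.reg .rdi = u.reg .rdi := w_kept_10540c.get .rdi rfl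
    have c_rdx : s_10540c.reg .rdx = u.reg .rdx := w_kept_10540c.get .rdx rfl
    v_after_call w_rsp_10540c w_mem_10540c
    simp only [c_rdi, c_rdx] at w_same
    obtain ⟨hw1, hw2, hw3⟩ := hwhere
    -- the stack slots still needed: the saved rbp, rbx and the return address
    have hp1 : UInt64.ofNat (s_10540c.mem.readLE (u.reg .rsp - 8) 8) = u.reg .rbp := by u_resolve
    rw [w_mem_10540c] at hp1
    have hs1 : UInt64.ofNat (s_10540cr.mem.readLE (u.reg .rsp - 8) 8) = u.reg .rbp := by u_frame hp1
    have hp2 : UInt64.ofNat (s_10540c.mem.readLE (u.reg .rsp - 16) 8) = u.reg .rbx := by u_resolve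
    rw [w_mem_10540c] at hp2
    have hs2 : UInt64.ofNat (s_10540cr.mem.readLE (u.reg .rsp - 16) 8) = u.reg .rbx := by u_frame hp2
    have hp0 : UInt64.ofNat (s_10540c.mem.readLE (u.reg .rsp) 8) = ret := by u_resolve
    rw [w_mem_10540c] at hp0
    have hs0 : UInt64.ofNat (s_10540cr.mem.readLE (u.reg .rsp) 8) = ret := by u_frame hp0
    have hsame : Mem.SameExcept [⟨(u.reg .rsp).toNat - 112, (u.reg .rsp).toNat⟩,
        ⟨(u.reg .rdi).toNat, (u.reg .rdi).toNat + 64⟩] u.mem s_10540cr.mem := by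
      u_same
    have hun : ShadowUntouched u.mem s_10540cr.mem := by v_untouched
    -- 0x105411 … 0x105424, toy.c:40: `64 - n` to rdx, `buffer + n` to rdi, the byte `fill_byte` (an unchecked load of the global at
    -- 0x141800) to esi, the call of `memset`
    u_walk hcode [hμ.vendor] span [ProgX.Base.L.textLo, ProgX.Base.L.textHi] side (v_side)
    · -- call_inv (0x105424): DF and the MXCSR masks at the entry of `memset`
      v_inv
    · -- pre_105424, toy.c:40: the precondition of `memset(buffer + n, fill_byte, 64 - n)`: the rest of the buffer
      have hun' : ShadowUntouched u.mem s_105424.mem := by v_untouched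
      refine ⟨hsh.callee hun' ?_ ?_ ?_, ?_⟩
      · rw [w_rsp]
        u_omega
      · rw [w_rsp]
        u_omega
      · rw [w_rsp]
        u_omega
      · rw [w_rdi, w_rdx]
        right
        refine hlbuf.sub _ _ ?_ ?_
        · u_omega
        · u_omega
    · -- 0x105429: after the return of `memset`
      v_after_call w_rsp_105424 w_mem_105424
      simp only [w_rdi_105424, w_rdx_105424] at w_same
      -- the stack slots again: through the push of the return address, then through `memset`'s footprint
      have hq1 : UInt64.ofNat ((s_10540cr.mem.writeLE (u.reg .rsp - 32) 8 1070121).readLE (u.reg .rsp - 8) 8)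
          = u.reg .rbp := by u_frame hs1
      have ht1 : UInt64.ofNat (s_105424r.mem.readLE (u.reg .rsp - 8) 8) = u.reg .rbp := by u_frame hq1
      have hq2 : UInt64.ofNat ((s_10540cr.mem.writeLE (u.reg .rsp - 32) 8 1070121).readLE (u.reg .rsp - 16) 8)
          = u.reg .rbx := by u_frame hs2
      have ht2 : UInt64.ofNat (s_105424r.mem.readLE (u.reg .rsp - 16) 8) = u.reg .rbx := by u_frame hq2
      have hq0 : UInt64.ofNat ((s_10540cr.mem.writeLE (u.reg .rsp - 32) 8 1070121).readLE (u.reg .rsp) 8)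
          = ret := by u_frame hs0
      have ht0 : UInt64.ofNat (s_105424r.mem.readLE (u.reg .rsp) 8) = ret := by u_frame hq0
      have hsame2 : Mem.SameExcept [⟨(u.reg .rsp).toNat - 112, (u.reg .rsp).toNat⟩,
          ⟨(u.reg .rdi).toNat, (u.reg .rdi).toNat + 64⟩] u.mem s_105424r.mem := by
        u_same
      have hun2 : ShadowUntouched u.mem s_105424r.mem := by v_untouched
      -- 0x105429 … 0x10542f, toy.c:41: `add rsp, 8`, the two pops, the `ret`
      u_walk hcode [hμ.vendor] span [ProgX.Base.L.textLo, ProgX.Base.L.textHi] side (v_side)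
      refine ReachVia.done ?_
      v_returned
      -- the post: no store went to the shadow
      show ShadowUntouched u.mem s_10542f.mem
      rw [w_mem]
      exact hun2
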